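-- pv_equiv track=rewrite | github.com/ChaniMil/ECC-linear-time | parameters.py | primes_1_mod_4
-- ===== SOURCE A (Python) =====
-- def primes_1_mod_4(limit):
--     """
--     This function generate a list of prime numbers up to `limit` that are equivalent to 1 mod 4
--     :param limit: The upper limit to generate prime numbers.
--     :return: A list of prime numbers that are 1 mod 4.
--     """
--     if limit < 2:  # there are no primes
--         return []
--
--     sieve = [True] * (limit + 1)  # sieve of Eratosthenes to identify primes
--     sieve[0] = sieve[1] = False  # 0 and 1 are not prime numbers
--
--     for start in range(2, int(limit ** 0.5) + 1):
--         if sieve[start]: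
--             # mark multiples of the current prime as non-prime
--             for multiple in range(start * start, limit + 1, start):
--                 sieve[multiple] = False
--
--     primes_1_mod_4_list = [num for num in range(2, limit + 1) if sieve[num] and num % 4 == 1]
--     return primes_1_mod_4_list
-- ===== SOURCE B (Python) =====
-- def primes_1_mod_4(limit):
--     def is_prime(n):
--         for d in range(2, int(n ** 0.5) + 1):
--             if n % d == 0:
--                 return False
--         return True
--
--     result = []
--     for num in range(2, limit + 1):
--         if num % 4 == 1 and is_prime(num):
--             result.append(num)
--     return result
-- ===== Notes on version B (the rewrite author's own statement) =====
-- stated objective: alternative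
-- what changed: Replaces the global sieve-of-Eratosthenes array with a per-number trial-division primality test up to int(num**0.5), collecting qualifying numbers in one pass with no auxiliary array.
import Mathlib
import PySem

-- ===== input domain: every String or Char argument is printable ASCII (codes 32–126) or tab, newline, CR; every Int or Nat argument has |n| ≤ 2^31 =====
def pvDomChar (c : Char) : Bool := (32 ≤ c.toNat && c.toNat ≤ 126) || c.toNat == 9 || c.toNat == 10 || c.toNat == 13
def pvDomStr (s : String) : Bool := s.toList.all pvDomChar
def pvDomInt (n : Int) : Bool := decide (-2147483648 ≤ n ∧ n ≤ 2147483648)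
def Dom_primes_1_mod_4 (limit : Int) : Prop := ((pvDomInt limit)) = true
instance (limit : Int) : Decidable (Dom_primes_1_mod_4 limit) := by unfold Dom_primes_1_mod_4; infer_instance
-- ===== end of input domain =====

-- B replaces A's sieve-of-Eratosthenes array with a per-number trial-division primality
-- test (alternative decomposition; not claimed faster).
-- Note on floats: Python's int(x ** 0.5) equals the integer square root for every
-- 0 ≤ x ≤ 2^31 (double sqrt is correctly rounded and the error is far below the gap
-- to the next integer there), so it is ported as Int.sqrt; Dom bounds the inputs.

-- ===== PORT A =====
-- inner loop 'for multiple in range(start*start, limit+1, start): sieve[multiple] = False'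
def pvMark (limit start : Int) (sv : List Bool) : List Bool :=
  (PySem.List.pyRange (start * start) (limit + 1) start).foldl
    (fun sv m => sv.set m.toNat false) sv

-- one iteration of 'for start in …: if sieve[start]: …'; the index start is always
-- in range (2 ≤ start ≤ √limit ≤ limit < len sieve), so Python's sieve[start] = getD
def pvStep (limit : Int) (sv : List Bool) (start : Int) : List Bool :=
  if sv.getD start.toNat false then pvMark limit start sv else sv

-- 'sieve = [True] * (limit+1); sieve[0] = sieve[1] = False'
def pvInit (limit : Int) : List Bool :=
  ((List.replicate (limit + 1).toNat true).set 0 false).set 1 false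

def primes_1_mod_4 (limit : Int) : List Int :=
  if limit < 2 then []
  else
    let sieve := (PySem.List.pyRange 2 (Int.sqrt limit + 1) 1).foldl (pvStep limit) (pvInit limit)
    (PySem.List.pyRange 2 (limit + 1) 1).filter
      (fun num => sieve.getD num.toNat false && (PySem.Int.mod num 4 == 1))

-- ===== PORT B =====
-- 'for d in range(2, int(n ** 0.5) + 1): if n % d == 0: return False / return True'
def pvIsPrime (n : Int) : Bool :=
  (PySem.List.pyRange 2 (Int.sqrt n + 1) 1).all (fun d => !(PySem.Int.mod n d == 0))

def primes_1_mod_4_alt (limit : Int) : List Int :=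
  (PySem.List.pyRange 2 (limit + 1) 1).foldl
    (fun result num =>
      if PySem.Int.mod num 4 == 1 && pvIsPrime num then result ++ [num] else result) []

-- ===== PRECONDITION & SPEC =====
def Spec_primes_1_mod_4 (limit : Int) (out : List Int) : Prop := out = primes_1_mod_4_alt limit
instance (limit : Int) (out : List Int) : Decidable (Spec_primes_1_mod_4 limit out) := by unfold Spec_primes_1_mod_4; infer_instance

-- ===== CLAIM (what is proved, stated in full; the proofs are below) =====
def Claim_equal_primes_1_mod_4 : Prop := ∀ (limit : Int), Dom_primes_1_mod_4 limit → Spec_primes_1_mod_4 limit (primes_1_mod_4 limit)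

-- ===== LEMMAS AND PROOFS =====

-- d ≤ ⌊√n⌋ ↔ d² ≤ n, the bridge for both trial bounds
theorem pv_le_sqrt_iff (n d : Int) (hn : 0 ≤ n) (hd : 0 ≤ d) :
    d ≤ Int.sqrt n ↔ d * d ≤ n := by
  unfold Int.sqrt
  rw [show d = (d.toNat : Int) by omega, show n = (n.toNat : Int) by omega]
  rw [Nat.cast_le, Nat.le_sqrt]
  constructor
  · intro h; exact_mod_cast Nat.cast_le.mpr h
  · intro h; exact_mod_cast h

theorem pv_getD_set_false (sv : List Bool) (i n : Nat) :
    (sv.set i false).getD n false = if i = n then false else sv.getD n false := by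
  simp only [List.getD_eq_getElem?_getD, List.getElem?_set]
  by_cases h : i = n
  · subst h
    by_cases hlen : i < sv.length <;> simp [hlen]
  · simp [h]

-- effect of the inner marking loop on one entry
theorem pv_mark_getD (l : List Int) (sv : List Bool) (n : Nat) :
    ((l.foldl (fun sv m => sv.set m.toNat false) sv).getD n false)
      = (sv.getD n false && !(l.any (fun m => m.toNat == n))) := by
  induction l generalizing sv with
  | nil => simp
  | cons m t ih =>
      simp only [List.foldl_cons, List.any_cons, ih, pv_getD_set_false]
      by_cases h : m.toNat = n
      · simp [h]
      · have hb : (m.toNat == n) = false := by simpa using h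
        rw [if_neg h, hb]
        simp

-- the value ¬marked limit s n: n has no divisor d with 2 ≤ d ≤ s and d² ≤ n
def pvMarked (s n : Int) : Prop := ∃ d : Int, 2 ≤ d ∧ d ≤ s ∧ d ∣ n ∧ d * d ≤ n

theorem pv_marked_succ (s n : Int) (hs : 1 ≤ s) :
    pvMarked (s + 1) n ↔ pvMarked s n ∨ ((s + 1) ∣ n ∧ (s + 1) * (s + 1) ≤ n) := by
  constructor
  · rintro ⟨d, h2, hds, hdvd, hsq⟩
    by_cases h : d ≤ s
    · exact Or.inl ⟨d, h2, h, hdvd, hsq⟩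
    · have hd : d = s + 1 := by omega
      subst hd; exact Or.inr ⟨hdvd, hsq⟩
  · rintro (⟨d, h2, hds, hdvd, hsq⟩ | ⟨hdvd, hsq⟩)
    · exact ⟨d, h2, by omega, hdvd, hsq⟩
    · exact ⟨s + 1, by omega, le_refl _, hdvd, hsq⟩

-- the sieve invariant: after processing starts 2..s, entry n holds true iff
-- n ≥ 2 and n is not marked by any divisor ≤ s
theorem pv_sieve_inv (limit : Int) (hl : 2 ≤ limit) :
    ∀ s : Int, 1 ≤ s → s ≤ limit →
    ∀ n : Int, 0 ≤ n → n ≤ limit →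
    (((PySem.List.pyRange 2 (s + 1) 1).foldl (pvStep limit) (pvInit limit)).getD n.toNat false = true
      ↔ 2 ≤ n ∧ ¬ pvMarked s n) := by
  intro s h1 hsl
  induction s, h1 using Int.le_induction with
  | base =>
      intro n hn0 hnl
      rw [PySem.List.pyRange_one_eq_nil (by omega)]
      simp only [List.foldl_nil, pvInit]
      rw [pv_getD_set_false, pv_getD_set_false]
      have hrange : n.toNat < (limit + 1).toNat := by omega
      have hnm : ¬ pvMarked 1 n := by rintro ⟨d, h2, hd1, _, _⟩; omega
      by_cases h0 : n = 0
      · simp [h0]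
      · by_cases h1' : n = 1
        · subst h1'; simp
        · have : (1 : Nat) ≠ n.toNat := by omega
          have : (0 : Nat) ≠ n.toNat := by omega
          simp only [List.getD_eq_getElem?_getD, List.getElem?_replicate]
          rw [if_neg (by omega), if_neg (by omega), if_pos hrange]
          simp [hnm]
          omega
  | succ s h1 ih =>
      intro n hn0 hnl
      have ihs := ih (by omega)
      rw [show (s + 1 + 1 : Int) = (s + 1) + 1 by ring,
          PySem.List.pyRange_one_succ_right (by omega : (2:Int) ≤ s + 1),
          List.foldl_append]
      set sv := (PySem.List.pyRange 2 (s + 1) 1).foldl (pvStep limit) (pvInit limit) with hsv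
      simp only [List.foldl_cons, List.foldl_nil, pvStep]
      have hguard : sv.getD (s + 1).toNat false = true ↔ ¬ pvMarked s (s + 1) := by
        rw [ihs (s + 1) (by omega) (by omega)]
        constructor
        · exact fun h => h.2
        · exact fun h => ⟨by omega, h⟩
      by_cases hg : sv.getD (s + 1).toNat false = true
      · -- start = s+1 survives: mark its multiples from (s+1)² on
        rw [if_pos hg]
        have hnm : ¬ pvMarked s (s + 1) := hguard.mp hg
        unfold pvMark
        rw [pv_mark_getD]
        have hany : ((PySem.List.pyRange ((s+1)*(s+1)) (limit+1) (s+1)).any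
            (fun m => m.toNat == n.toNat) = true)
            ↔ ((s+1) ∣ n ∧ (s+1)*(s+1) ≤ n) := by
          rw [List.any_eq_true]
          constructor
          · rintro ⟨m, hm, hbeq⟩
            rw [PySem.List.mem_pyRange_iff_of_pos (by omega)] at hm
            obtain ⟨hma, hmb, k, hk⟩ := hm
            have hmn : m = n := by
              have := Nat.beq_eq_true_eq m.toNat n.toNat ▸ hbeq
              have hm0 : 0 ≤ m := by nlinarith
              omega
            subst hmn
            exact ⟨⟨k + (s+1), by linarith [hk]⟩, hma⟩
          · rintro ⟨⟨k, hk⟩, hsq⟩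
            refine ⟨n, ?_, by simp⟩
            rw [PySem.List.mem_pyRange_iff_of_pos (by omega)]
            exact ⟨hsq, by omega, ⟨k - (s+1), by linarith [hk]⟩⟩
        rw [pv_marked_succ s n h1]
        constructor
        · intro h
          rw [Bool.and_eq_true] at h
          obtain ⟨h1', h2'⟩ := h
          rw [ihs n hn0 hnl] at h1'
          refine ⟨h1'.1, ?_⟩
          rintro (hm | hm)
          · exact h1'.2 hm
          · rw [hany.mpr hm] at h2'; simp at h2'
        · rintro ⟨hn2, hnm'⟩
          rw [Bool.and_eq_true]
          refine ⟨(ihs n hn0 hnl).mpr ⟨hn2, fun h => hnm' (Or.inl h)⟩, ?_⟩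
          have hfa : ((PySem.List.pyRange ((s+1)*(s+1)) (limit+1) (s+1)).any
              (fun m => m.toNat == n.toNat)) = false := by
            by_contra hc
            rw [Bool.not_eq_false] at hc
            exact hnm' (Or.inr (hany.mp hc))
          rw [hfa]; rfl
      · -- start = s+1 is composite: nothing new gets marked
        rw [if_neg hg, ihs n hn0 hnl]
        have hm : pvMarked s (s + 1) := by
          by_contra hc; exact hg (hguard.mpr hc)
        have hiff : pvMarked (s + 1) n ↔ pvMarked s n := by
          rw [pv_marked_succ s n h1]
          constructor
          · rintro (h | ⟨⟨k, hk⟩, hsq⟩)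
            · exact h
            · obtain ⟨p, hp2, hps, hpd, hpsq⟩ := hm
              obtain ⟨q, hq⟩ := hpd
              refine ⟨p, hp2, hps, ⟨q * k, by rw [hk, hq]; ring⟩, ?_⟩
              nlinarith
          · exact Or.inl
        rw [hiff]

-- the trial-division test says exactly "no divisor d with 2 ≤ d and d² ≤ n"
theorem pv_isPrime_iff (n : Int) (hn : 2 ≤ n) :
    pvIsPrime n = true ↔ ¬ ∃ d : Int, 2 ≤ d ∧ d ∣ n ∧ d * d ≤ n := by
  unfold pvIsPrime
  rw [List.all_eq_true]
  constructor
  · rintro h ⟨d, h2, hdvd, hsq⟩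
    have hd : d ∈ PySem.List.pyRange 2 (Int.sqrt n + 1) 1 := by
      rw [PySem.List.mem_pyRange_one]
      have := (pv_le_sqrt_iff n d (by omega) (by omega)).mpr hsq
      omega
    have := h d hd
    rw [Bool.not_eq_eq_eq_not, Bool.not_true, beq_eq_false_iff_ne] at this
    exact this ((PySem.Int.mod_eq_zero_iff_dvd n d).mpr hdvd)
  · intro h d hd
    rw [PySem.List.mem_pyRange_one] at hd
    rw [Bool.not_eq_eq_eq_not, Bool.not_true, beq_eq_false_iff_ne]
    intro hmod
    exact h ⟨d, hd.1, (PySem.Int.mod_eq_zero_iff_dvd n d).mp hmod,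
      (pv_le_sqrt_iff n d (by omega) (by omega)).mp (by omega)⟩

-- for 2 ≤ n ≤ limit the sieve bound √limit and the per-number bound √n agree
theorem pv_marked_iff (limit n : Int) (h2 : 2 ≤ n) (hnl : n ≤ limit) :
    pvMarked (Int.sqrt limit) n ↔ ∃ d : Int, 2 ≤ d ∧ d ∣ n ∧ d * d ≤ n := by
  constructor
  · rintro ⟨d, ha, _, hc, hd⟩; exact ⟨d, ha, hc, hd⟩
  · rintro ⟨d, ha, hc, hd⟩
    exact ⟨d, ha, (pv_le_sqrt_iff limit d (by omega) (by omega)).mpr (by omega), hc, hd⟩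

-- ===== VERDICT (by name: the statement is the Claim_ definition above) =====
theorem primes_1_mod_4_spec : Claim_equal_primes_1_mod_4 := by
  intro limit _
  unfold Spec_primes_1_mod_4 primes_1_mod_4 primes_1_mod_4_alt
  rw [PySem.List.foldl_append_if_eq_filter]
  by_cases hl : limit < 2
  · rw [if_pos hl, PySem.List.pyRange_one_eq_nil (by omega)]
    simp
  · rw [if_neg hl, List.nil_append]
    apply List.filter_congr
    intro n hn
    rw [PySem.List.mem_pyRange_one] at hn
    have hsq1 : 1 ≤ Int.sqrt limit := by
      unfold Int.sqrt
      have : 0 < Nat.sqrt limit.toNat := Nat.sqrt_pos.mpr (by omega)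
      omega
    have hsql : Int.sqrt limit ≤ limit := by
      unfold Int.sqrt
      have := Nat.sqrt_le_self limit.toNat
      omega
    have hinv := pv_sieve_inv limit (by omega) (Int.sqrt limit) hsq1 hsql n (by omega) (by omega)
    have hentry : ((PySem.List.pyRange 2 (Int.sqrt limit + 1) 1).foldl (pvStep limit)
        (pvInit limit)).getD n.toNat false = pvIsPrime n := by
      rw [Bool.eq_iff_iff, hinv, pv_isPrime_iff n (by omega), pv_marked_iff limit n (by omega) (by omega)]
      constructor
      · exact fun h => h.2
      · exact fun h => ⟨by omega, h⟩
    rw [hentry, Bool.and_comm]
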